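-- pv_equiv track=rewrite | github.com/skuxy/PPJ | GLA.py | je_operator
-- ===== SOURCE A (Python) =====
-- def je_operator(izraz, i):
--     #Funkcija provjerava ima li operator svoje znacenje ili prefiksiran neparnim brojem znakova \
--     #Funkcija vraca bool
--     br = 0
--     while((i-1) >= 0 and izraz[i-1] == '\\'):
--         br = br + 1
--         i = i - 1
--     if(br%2 == 0):
--         return True
--     else:
--         return False
-- ===== SOURCE B (Python) =====
-- def je_operator(izraz, i):
--     # Trailing-backslash count of the prefix izraz[:i], measured in one shot:
--     # the operator keeps its meaning iff that count is even.
--     p = izraz[:max(i, 0)]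
--     count = len(p) - len(p.rstrip('\\'))
--     return count % 2 == 0
-- ===== Notes on version B (the rewrite author's own statement) =====
-- stated objective: simpler
-- what changed: Replaces the character-by-character backward while loop with a single slice-and-rstrip measurement of the trailing-backslash count of izraz[:i].
import Mathlib
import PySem

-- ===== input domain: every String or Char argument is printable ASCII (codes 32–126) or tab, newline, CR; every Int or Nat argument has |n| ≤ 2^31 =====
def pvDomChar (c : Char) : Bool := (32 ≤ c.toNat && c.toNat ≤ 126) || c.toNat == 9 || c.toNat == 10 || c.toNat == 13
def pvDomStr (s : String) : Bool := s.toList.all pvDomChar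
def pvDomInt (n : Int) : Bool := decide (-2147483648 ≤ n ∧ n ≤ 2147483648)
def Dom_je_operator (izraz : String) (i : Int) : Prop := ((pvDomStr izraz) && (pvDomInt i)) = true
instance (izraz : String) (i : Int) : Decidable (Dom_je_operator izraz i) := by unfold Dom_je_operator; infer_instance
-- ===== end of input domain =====

-- B replaces A's character-by-character backward while loop with a single
-- slice-and-rstrip measurement of the trailing-backslash count (objective: simpler).

-- ===== PORT A =====
-- the while loop of A: state (i, br); izraz[i-1] via pyGet? (none = IndexError,
-- excluded by Pre_; the loop exits there, matching nothing Pre_ admits)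
def jeOperatorLoop (izraz : String) (i : Int) (br : Nat) : Bool :=
  if _h : 1 ≤ i then
    match PySem.Str.pyGet? izraz (i - 1) with
    | some c => if c = '\\' then jeOperatorLoop izraz (i - 1) (br + 1)
                else decide (br % 2 = 0)
    | none => decide (br % 2 = 0)   -- Python raises IndexError here (outside Pre_)
  else decide (br % 2 = 0)
termination_by i.toNat
decreasing_by omega

def je_operator (izraz : String) (i : Int) : Bool :=
  jeOperatorLoop izraz i 0

-- ===== PORT B =====
-- exact hand port of str.rstrip('\\'): drop trailing backslashes
def rstripBackslash (cs : List Char) : List Char :=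
  (cs.reverse.dropWhile (· = '\\')).reverse

def je_operator_alt (izraz : String) (i : Int) : Bool :=
  let p := (PySem.Str.slice izraz none (some (max i 0))).toList
  let count := p.length - (rstripBackslash p).length
  decide (count % 2 = 0)

-- ===== PRECONDITION & SPEC =====
-- Pre_ excludes exactly i > len(izraz), where A's izraz[i-1] raises IndexError.
def Pre_je_operator (izraz : String) (i : Int) : Prop :=
  i ≤ PySem.Str.len izraz
instance (izraz : String) (i : Int) : Decidable (Pre_je_operator izraz i) := by
  unfold Pre_je_operator; infer_instance

def pvWitness_je_operator : String × Int := ("ab\\", 3)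

def Spec_je_operator (izraz : String) (i : Int) (out : Bool) : Prop := out = je_operator_alt izraz i
instance (izraz : String) (i : Int) (out : Bool) : Decidable (Spec_je_operator izraz i out) := by unfold Spec_je_operator; infer_instance

-- ===== CLAIM (what is proved, stated in full; the proofs are below) =====
def Claim_equal_je_operator : Prop := ∀ (izraz : String) (i : Int), Dom_je_operator izraz i → Pre_je_operator izraz i → Spec_je_operator izraz i (je_operator izraz i)

-- ===== LEMMAS AND PROOFS =====

-- trailing-backslash count
def tbs (cs : List Char) : Nat := (cs.reverse.takeWhile (· = '\\')).length

theorem tbs_eq_sub (cs : List Char) :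
    cs.length - (rstripBackslash cs).length = tbs cs := by
  simp only [rstripBackslash, tbs, List.length_reverse]
  have h := List.takeWhile_append_dropWhile (p := fun c => c = '\\') (l := cs.reverse)
  have := congrArg List.length h
  simp only [List.length_append, List.length_reverse] at this
  omega

theorem tbs_append_bs (l : List Char) : tbs (l ++ ['\\']) = tbs l + 1 := by
  simp [tbs]

theorem tbs_append_ne (l : List Char) (c : Char) (hc : c ≠ '\\') :
    tbs (l ++ [c]) = 0 := by
  simp [tbs, hc]

theorem loop_eq (izraz : String) (i : Int) (br : Nat)
    (h0 : 0 ≤ i) (hlen : i ≤ (izraz.toList.length : Int)) :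
    jeOperatorLoop izraz i br =
      decide ((br + tbs (izraz.toList.take i.toNat)) % 2 = 0) := by
  by_cases h1 : 1 ≤ i
  · -- i ≥ 1: izraz[i-1] is in range
    have hlt : (i - 1).toNat < izraz.toList.length := by omega
    have hget : PySem.Str.pyGet? izraz (i - 1) =
        some (izraz.toList[(i - 1).toNat]) := by
      simp only [PySem.Str.pyGet?]
      exact PySem.List.pyGet?_eq_some_getElem _ (by omega) (by omega)
    have htake : izraz.toList.take i.toNat =
        izraz.toList.take (i - 1).toNat ++ [izraz.toList[(i - 1).toNat]] := by
      have : i.toNat = (i - 1).toNat + 1 := by omega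
      rw [this, List.take_add_one, List.getElem?_eq_getElem hlt]
      rfl
    rw [jeOperatorLoop, dif_pos h1]; simp only [hget]
    by_cases hc : izraz.toList[(i - 1).toNat] = '\\'
    · rw [if_pos hc]
      rw [loop_eq izraz (i - 1) (br + 1) (by omega) (by omega)]
      rw [htake, hc, tbs_append_bs]
      have harith : br + 1 + tbs (List.take (i - 1).toNat izraz.toList) =
          br + (tbs (List.take (i - 1).toNat izraz.toList) + 1) := by omega
      rw [harith]
    · rw [if_neg hc, htake, tbs_append_ne _ _ hc]
      simp
  · -- i = 0 (since 0 ≤ i): loop exits, prefix is empty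
    have hi : i = 0 := by omega
    rw [jeOperatorLoop, dif_neg h1]
    simp [hi, tbs]
termination_by i.toNat
decreasing_by omega

theorem alt_eq (izraz : String) (i : Int) (h0 : 0 ≤ i) :
    je_operator_alt izraz i =
      decide (tbs (izraz.toList.take i.toNat) % 2 = 0) := by
  have hmax : max i 0 = i := by omega
  simp only [je_operator_alt, hmax, PySem.Str.toList_slice]
  rw [show PySem.Chars.slice izraz.toList none (some i) =
        izraz.toList.take i.toNat from PySem.List.slice_to _ h0]
  rw [tbs_eq_sub]

-- ===== VERDICT (by name: the statement is the Claim_ definition above) =====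
theorem je_operator_spec : Claim_equal_je_operator := by
  intro izraz i _ hpre
  unfold Spec_je_operator je_operator
  unfold Pre_je_operator at hpre
  rw [PySem.Str.len_eq] at hpre
  by_cases h0 : 0 ≤ i
  · rw [loop_eq izraz i 0 h0 hpre, alt_eq izraz i h0]
    simp
  · -- i < 0: A's loop condition fails at once; B slices the empty prefix
    have hmax : max i 0 = 0 := by omega
    rw [jeOperatorLoop, dif_neg (by omega)]
    simp only [je_operator_alt, hmax, PySem.Str.toList_slice]
    rw [show PySem.Chars.slice izraz.toList none (some (0 : Int)) =
        izraz.toList.take (0 : Int).toNat from PySem.List.slice_to _ (by omega)]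
    simp [rstripBackslash]
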